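-- pv_equiv track=rewrite | github.com/ssaidwhotho/PirateSearchEngine | query.py | check_distance
-- ===== SOURCE A (Python) =====
-- def check_distance(word_positions: list, distance: int) -> int:
--     word_positions.sort()
--     count = 0
--
--     # Iterate through the list, checking the distance between each pair of words
--     for i in range(len(word_positions)):
--         j = i + 1
--         while j < len(word_positions) and word_positions[j] - word_positions[i] <= distance:
--             if word_positions[j] - word_positions[i] == distance:
--                 count += 1
--             j += 1
--
--     return count
-- ===== SOURCE B (Python) =====
-- def check_distance(word_positions: list, distance: int) -> int:
--     # Counting by value instead of scanning pairs: O(n) expected time, no sort.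
--     # (Unlike A, this does not sort word_positions in place.)
--     if distance < 0:
--         return 0
--     cnt = {}
--     for p in word_positions:
--         cnt[p] = cnt.get(p, 0) + 1
--     if distance == 0:
--         return sum(c * (c - 1) // 2 for c in cnt.values())
--     return sum(c * cnt.get(v + distance, 0) for v, c in cnt.items())
-- ===== Notes on version B (the rewrite author's own statement) =====
-- stated objective: faster
-- what changed: Replaces sort plus a nested index scan over all close pairs by a single counting pass into a hash map and a closed-form sum cnt[v]*cnt[v+distance] (c*(c-1)//2 for distance 0, 0 for negative distance), and B does not mutate the input list.
import Mathlib
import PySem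

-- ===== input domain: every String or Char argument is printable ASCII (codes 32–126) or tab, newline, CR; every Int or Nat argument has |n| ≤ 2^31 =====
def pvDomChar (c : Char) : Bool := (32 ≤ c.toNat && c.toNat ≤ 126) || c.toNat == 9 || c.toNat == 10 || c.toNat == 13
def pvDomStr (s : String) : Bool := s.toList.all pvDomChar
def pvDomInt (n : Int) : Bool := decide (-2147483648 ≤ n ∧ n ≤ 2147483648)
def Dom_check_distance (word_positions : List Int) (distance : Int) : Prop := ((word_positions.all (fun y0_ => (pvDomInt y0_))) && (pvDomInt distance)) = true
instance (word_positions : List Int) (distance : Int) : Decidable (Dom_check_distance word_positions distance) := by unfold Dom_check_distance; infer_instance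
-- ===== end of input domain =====

-- B replaces A's sort + nested index scan by one counting pass into a dict and a closed-form sum
-- over the counts (objective: faster). A sorts word_positions in place, B does not mutate it;
-- the equivalence proved here is about the return value only.

-- ===== PORT A =====
-- the inner 'while j < len(word_positions) and word_positions[j] - word_positions[i] <= distance'
-- loop of A; the loops produce only indices 0 <= i, j < len, so Nat indexing with getD is exact
def pvInnerA (s : List Int) (distance : Int) (i j : Nat) (count : Int) : Int :=
  if _h : j < s.length then
    if s.getD j 0 - s.getD i 0 ≤ distance then
      pvInnerA s distance i (j + 1)
        (if s.getD j 0 - s.getD i 0 = distance then count + 1 else count)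
    else count
  else count
termination_by s.length - j

def check_distance (word_positions : List Int) (distance : Int) : Int :=
  -- word_positions.sort()
  let s := PySem.List.sorted word_positions (fun x => x) false
  -- for i in range(len(word_positions)): j = i + 1; while ...: ... j += 1
  (List.range s.length).foldl (fun count i => pvInnerA s distance i (i + 1) count) 0

-- ===== PORT B =====
def check_distance_alt (word_positions : List Int) (distance : Int) : Int :=
  if distance < 0 then 0
  else
    -- cnt[p] = cnt.get(p, 0) + 1 over the list
    let cnt : PySem.Dict Int Int :=
      word_positions.foldl (fun d p => d.insert p (d.getD p 0 + 1)) PySem.Dict.empty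
    if distance = 0 then
      -- sum(c * (c - 1) // 2 for c in cnt.values())
      (cnt.values.map (fun c => PySem.Int.floordiv (c * (c - 1)) 2)).sum
    else
      -- sum(c * cnt.get(v + distance, 0) for v, c in cnt.items())
      (cnt.items.map (fun vc => vc.2 * cnt.getD (vc.1 + distance) 0)).sum

-- ===== PRECONDITION & SPEC =====
def Spec_check_distance (word_positions : List Int) (distance : Int) (out : Int) : Prop := out = check_distance_alt word_positions distance
instance (word_positions : List Int) (distance : Int) (out : Int) : Decidable (Spec_check_distance word_positions distance out) := by unfold Spec_check_distance; infer_instance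

-- ===== CLAIM (what is proved, stated in full; the proofs are below) =====
def Claim_equal_check_distance : Prop := ∀ (word_positions : List Int) (distance : Int), Dom_check_distance word_positions distance → Spec_check_distance word_positions distance (check_distance word_positions distance)

-- ===== LEMMAS AND PROOFS =====

def pvF : List Int → Int → Int
  | [], _ => 0
  | x :: t, d => ((t.filter (fun y => y - x = d)).length : Int) + pvF t d

lemma pvFilter_len_eq_count (t : List Int) (x d : Int) :
    ((t.filter (fun y => y - x = d)).length : Int) = (t.count (x + d) : Int) := by
  congr 1
  rw [List.count_eq_length_filter]
  congr 1
  apply List.filter_congr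
  intro y _
  have h : (y - x = d) ↔ (y = x + d) := by omega
  rw [Bool.eq_iff_iff]; simp [h]

lemma pvInnerA_eq (s : List Int) (d : Int) (hs : s.Pairwise (· ≤ ·)) (i : Nat)
    (j : Nat) (c : Int) :
      pvInnerA s d i j c
        = c + (((s.drop j).filter (fun y => y - s.getD i 0 = d)).length : Int) := by
  fun_induction pvInnerA s d i j c with
  | case1 j c h hle ih =>
    simp only [dite_eq_ite] at ih
    rw [ih, List.drop_eq_getElem_cons h, List.filter_cons]
    have hg : s.getD j 0 = s[j] := List.getD_eq_getElem s 0 h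
    split_ifs with h1 <;> (first | (simp_all; omega) | simp_all)
  | case2 j c h hgt =>
    have hd : s.drop j = s[j] :: s.drop (j+1) := List.drop_eq_getElem_cons h
    have hg : s.getD j 0 = s[j] := List.getD_eq_getElem s 0 h
    have hnil : (s.drop j).filter (fun y => decide (y - s.getD i 0 = d)) = [] := by
      rw [List.filter_eq_nil_iff]
      intro y hy
      have hle : s[j] ≤ y := by
        have hp : (s.drop j).Pairwise (· ≤ ·) := List.Pairwise.drop hs
        rw [hd] at hp hy
        rcases List.mem_cons.mp hy with hy | hy
        · simp [hy]
        · exact (List.pairwise_cons.mp hp).1 y hy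
      simp only [decide_eq_true_eq]
      omega
    rw [hnil]; simp
  | case3 j c h =>
    have : s.drop j = [] := List.drop_eq_nil_of_le (by omega)
    simp [this]

lemma pvFoldl_generic (s : List Int) (d : Int) (hs : s.Pairwise (· ≤ ·)) (L : List Nat) (a : Int) :
    L.foldl (fun count i => pvInnerA s d i (i + 1) count) a
      = a + (L.map (fun i => (((s.drop (i+1)).filter (fun y => y - s.getD i 0 = d)).length : Int))).sum := by
  induction L generalizing a with
  | nil => simp
  | cons i L ih =>
    simp only [List.foldl_cons, List.map_cons, List.sum_cons]
    rw [ih, pvInnerA_eq s d hs]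
    ring

lemma pvSum_range (d : Int) :
    ∀ s : List Int,
      ((List.range s.length).map
        (fun i => (((s.drop (i+1)).filter (fun y => y - s.getD i 0 = d)).length : Int))).sum
      = pvF s d := by
  intro s
  induction s with
  | nil => simp [pvF]
  | cons x t ih =>
    rw [List.length_cons, List.range_succ_eq_map]
    simp only [List.map_cons, List.map_map, List.sum_cons, Function.comp_def,
      Nat.succ_eq_add_one, List.drop_succ_cons, List.getD_cons_succ, List.getD_cons_zero,
      List.drop_zero]
    rw [pvF, ih]

lemma pvF_neg (s : List Int) (d : Int) (hs : s.Pairwise (· ≤ ·)) (hd : d < 0) : pvF s d = 0 := by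
  induction s with
  | nil => rfl
  | cons x t ih =>
    rcases List.pairwise_cons.mp hs with ⟨hx, ht⟩
    rw [pvF, ih ht]
    have : t.filter (fun y => decide (y - x = d)) = [] := by
      rw [List.filter_eq_nil_iff]
      intro y hy
      have := hx y hy
      simp only [decide_eq_true_eq]
      omega
    simp [this]

def pvPhi (l : List Int) (d : Int) : Int := (l.map (fun x => (l.count (x + d) : Int))).sum

lemma pvF_pos_eq_phi (s : List Int) (d : Int) (hs : s.Pairwise (· ≤ ·)) (hd : 0 < d) :
    pvF s d = pvPhi s d := by
  induction s with
  | nil => rfl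
  | cons x t ih =>
    rcases List.pairwise_cons.mp hs with ⟨hx, ht⟩
    have h1 : (x :: t).count (x + d) = t.count (x + d) :=
      List.count_cons_of_ne (by omega)
    have h2 : t.map (fun y => ((x :: t).count (y + d) : Int))
        = t.map (fun y => (t.count (y + d) : Int)) := by
      apply List.map_congr_left
      intro y hy
      have := hx y hy
      congr 1
      exact List.count_cons_of_ne (by omega)
    have hr : pvPhi (x :: t) d = (t.count (x + d) : Int) + pvPhi t d := by
      rw [pvPhi, List.map_cons, List.sum_cons, h1, h2]; rfl
    rw [pvF, pvFilter_len_eq_count, hr, ih ht]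

lemma pvPhi_perm {l l' : List Int} (d : Int) (p : l.Perm l') : pvPhi l d = pvPhi l' d := by
  unfold pvPhi
  rw [List.Perm.sum_eq (p.map _)]
  apply congrArg
  apply List.map_congr_left
  intro y _
  exact congrArg _ (p.count _)

lemma pvF_zero_cons (x : Int) (t : List Int) : pvF (x :: t) 0 = (t.count x : Int) + pvF t 0 := by
  rw [pvF]
  have := pvFilter_len_eq_count t x 0
  simp only [add_zero] at this
  rw [this]

lemma pvF_zero_perm {l l' : List Int} (p : l.Perm l') : pvF l 0 = pvF l' 0 := by
  induction p with
  | nil => rfl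
  | cons x p ih => rw [pvF_zero_cons, pvF_zero_cons, ih, p.count _]
  | swap x y l =>
    rw [pvF_zero_cons, pvF_zero_cons, pvF_zero_cons, pvF_zero_cons]
    by_cases hxy : x = y
    · subst hxy; ring
    · rw [List.count_cons_of_ne hxy, List.count_cons_of_ne (Ne.symm hxy)]
      ring
  | trans _ _ ih1 ih2 => rw [ih1, ih2]

lemma pvF_zero_append (a b : List Int) :
    pvF (a ++ b) 0 = pvF a 0 + (a.map (fun y => (b.count y : Int))).sum + pvF b 0 := by
  induction a with
  | nil => simp [pvF]
  | cons x a ih =>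
    rw [List.cons_append, pvF_zero_cons, ih, pvF_zero_cons, List.map_cons, List.sum_cons,
      List.count_append]
    push_cast
    ring

def pvC2 : Nat → Int
  | 0 => 0
  | c + 1 => c + pvC2 c

lemma pvF_zero_replicate (c : Nat) (x : Int) : pvF (List.replicate c x) 0 = pvC2 c := by
  induction c with
  | zero => rfl
  | succ c ih =>
    rw [List.replicate_succ, pvF_zero_cons, ih, List.count_replicate]
    simp [pvC2]

lemma pvGroup_mul (f : Int → Int) :
    ∀ (n : Nat) (l D : List Int), l.length ≤ n → D.Nodup → (∀ v, v ∈ D ↔ v ∈ l) →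
      (D.map (fun v => (l.count v : Int) * f v)).sum = (l.map f).sum := by
  intro n
  induction n with
  | zero =>
    intro l D hlen _ _
    have hl : l = [] := List.eq_nil_of_length_eq_zero (Nat.le_zero.mp hlen)
    subst hl
    simp
  | succ n ih =>
    intro l D hlen hD hmem
    match l with
    | [] => simp
    | x :: t =>
      have hx : x ∈ D := (hmem x).mpr (List.mem_cons_self)
      have hDp : D.Perm (x :: D.erase x) := List.perm_cons_erase hx
      have hsum : (D.map (fun v => ((x::t).count v : Int) * f v)).sum
          = ((x::t).count x : Int) * f x
            + ((D.erase x).map (fun v => ((x::t).count v : Int) * f v)).sum := by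
        rw [List.Perm.sum_eq (hDp.map _)]; simp
      have hcong : (D.erase x).map (fun v => ((x::t).count v : Int) * f v)
          = (D.erase x).map (fun v => ((t.filter (fun y => !(y == x))).count v : Int) * f v) := by
        apply List.map_congr_left
        intro v hv
        rcases (List.Nodup.mem_erase_iff hD).mp hv with ⟨hne, _⟩
        congr 2
        rw [List.count_cons_of_ne hne.symm]
        exact (List.count_filter (by simp [hne])).symm
      have hlen' : (t.filter (fun y => !(y == x))).length ≤ n :=
        le_trans (List.length_filter_le _ _) (by simpa using Nat.lt_succ_iff.mp (Nat.lt_of_lt_of_le (by simp) hlen))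
      have hD' : (D.erase x).Nodup := hD.erase x
      have hmem' : ∀ v, v ∈ D.erase x ↔ v ∈ t.filter (fun y => !(y == x)) := by
        intro v
        rw [List.Nodup.mem_erase_iff hD, hmem v, List.mem_filter]
        constructor
        · rintro ⟨hne, hvl⟩
          rcases List.mem_cons.mp hvl with h | h
          · exact absurd h hne
          · exact ⟨h, by simp [hne]⟩
        · rintro ⟨hvt, hb⟩
          exact ⟨by simpa using hb, List.mem_cons_of_mem _ hvt⟩
      have hrec := ih (t.filter (fun y => !(y == x))) (D.erase x) hlen' hD' hmem'
      have htp : t.Perm (List.replicate (t.count x) x ++ t.filter (fun y => !(y == x))) := by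
        have h := List.filter_append_perm (fun y => y == x) t
        rw [List.filter_beq] at h
        exact h.symm
      have hrs : (t.map f).sum = (t.count x : Int) * f x
          + ((t.filter (fun y => !(y == x))).map f).sum := by
        rw [List.Perm.sum_eq (htp.map f), List.map_append, List.sum_append,
          List.map_replicate, List.sum_replicate]
        simp
      rw [hsum, hcong, hrec, List.map_cons, List.sum_cons, hrs, List.count_cons_self]
      push_cast
      ring

lemma pvCount_filter_ne_self (t : List Int) (x : Int) :
    (t.filter (fun y => !(y == x))).count x = 0 := by
  rw [List.count_eq_zero]
  intro h
  rcases List.mem_filter.mp h with ⟨_, hb⟩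
  simp at hb

lemma pvGroup_c2 :
    ∀ (n : Nat) (l D : List Int), l.length ≤ n → D.Nodup → (∀ v, v ∈ D ↔ v ∈ l) →
      (D.map (fun v => pvC2 (l.count v))).sum = pvF l 0 := by
  intro n
  induction n with
  | zero =>
    intro l D hlen _ _
    have hl : l = [] := List.eq_nil_of_length_eq_zero (Nat.le_zero.mp hlen)
    subst hl
    simp [pvF, pvC2]
  | succ n ih =>
    intro l D hlen hD hmem
    match l with
    | [] => simp [pvF, pvC2]
    | x :: t =>
      have hx : x ∈ D := (hmem x).mpr (List.mem_cons_self)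
      have hDp : D.Perm (x :: D.erase x) := List.perm_cons_erase hx
      have hsum : (D.map (fun v => pvC2 ((x::t).count v))).sum
          = pvC2 ((x::t).count x)
            + ((D.erase x).map (fun v => pvC2 ((x::t).count v))).sum := by
        rw [List.Perm.sum_eq (hDp.map _)]; simp
      have hcong : (D.erase x).map (fun v => pvC2 ((x::t).count v))
          = (D.erase x).map (fun v => pvC2 ((t.filter (fun y => !(y == x))).count v)) := by
        apply List.map_congr_left
        intro v hv
        rcases (List.Nodup.mem_erase_iff hD).mp hv with ⟨hne, _⟩
        congr 1
        rw [List.count_cons_of_ne hne.symm]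
        exact (List.count_filter (by simp [hne])).symm
      have hlen' : (t.filter (fun y => !(y == x))).length ≤ n :=
        le_trans (List.length_filter_le _ _) (by simpa using Nat.lt_succ_iff.mp (Nat.lt_of_lt_of_le (by simp) hlen))
      have hD' : (D.erase x).Nodup := hD.erase x
      have hmem' : ∀ v, v ∈ D.erase x ↔ v ∈ t.filter (fun y => !(y == x)) := by
        intro v
        rw [List.Nodup.mem_erase_iff hD, hmem v, List.mem_filter]
        constructor
        · rintro ⟨hne, hvl⟩
          rcases List.mem_cons.mp hvl with h | h
          · exact absurd h hne
          · exact ⟨h, by simp [hne]⟩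
        · rintro ⟨hvt, hb⟩
          exact ⟨by simpa using hb, List.mem_cons_of_mem _ hvt⟩
      have hrec := ih (t.filter (fun y => !(y == x))) (D.erase x) hlen' hD' hmem'
      have htp : (x :: t).Perm
          (List.replicate (t.count x + 1) x ++ t.filter (fun y => !(y == x))) := by
        have h := List.filter_append_perm (fun y => y == x) t
        rw [List.filter_beq] at h
        rw [List.replicate_succ, List.cons_append]
        exact (h.symm.cons x)
      have hF : pvF (x :: t) 0
          = pvC2 (t.count x + 1) + pvF (t.filter (fun y => !(y == x))) 0 := by
        rw [pvF_zero_perm htp, pvF_zero_append, pvF_zero_replicate]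
        have hz : ((List.replicate (t.count x + 1) x).map
            (fun y => ((t.filter (fun y => !(y == x))).count y : Int))).sum = 0 := by
          rw [List.map_replicate, List.sum_replicate, pvCount_filter_ne_self]
          simp
        rw [hz]
        ring
      rw [hsum, hcong, hrec, hF, List.count_cons_self]

lemma pvFloordiv_c2 (c : Nat) :
    PySem.Int.floordiv ((c : Int) * ((c : Int) - 1)) 2 = pvC2 c := by
  have h2 : (c : Int) * ((c : Int) - 1) = 2 * pvC2 c := by
    induction c with
    | zero => simp [pvC2]
    | succ c ih =>
      rw [pvC2]
      push_cast
      push_cast at ih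
      linear_combination ih
  rw [h2, PySem.Int.floordiv_eq_ediv_of_pos (by norm_num)]
  omega

-- ===== VERDICT (by name: the statement is the Claim_ definition above) =====
theorem check_distance_spec : Claim_equal_check_distance := by
  intro wp d _
  unfold Spec_check_distance
  have hs : (PySem.List.sorted wp (fun x => x) false).Pairwise (· ≤ ·) := by
    have h := PySem.List.sorted_pairwise (xs := wp) (key := fun x : Int => x)
    simpa using h
  have hperm : (PySem.List.sorted wp (fun x => x) false).Perm wp :=
    PySem.List.sorted_perm wp (fun x => x) false
  have hA : check_distance wp d = pvF (PySem.List.sorted wp (fun x => x) false) d := by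
    rw [check_distance]
    rw [pvFoldl_generic _ _ hs, pvSum_range]
    ring
  rw [hA, check_distance_alt]
  have hcnt : wp.foldl (fun d p => d.insert p (d.getD p 0 + 1)) PySem.Dict.empty
      = PySem.Dict.counter wp := PySem.Dict.foldl_insert_getD_add_one_eq_counter wp
  rcases lt_trichotomy d 0 with hd | hd | hd
  · rw [if_pos hd]
    exact pvF_neg _ _ hs hd
  · subst hd
    rw [if_neg (lt_irrefl 0), if_pos rfl]
    simp only [hcnt]
    rw [pvF_zero_perm hperm]
    have hv : (PySem.Dict.counter wp).values
        = (PySem.Set.ofList wp).map (fun k => (wp.count k : Int)) := by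
      show (PySem.Dict.counter wp).items.map (·.2) = _
      rw [PySem.Dict.items_counter wp, List.map_map]
      rfl
    rw [hv, List.map_map]
    have hterm : ((fun c : Int => PySem.Int.floordiv (c * (c - 1)) 2) ∘ fun k => (wp.count k : Int))
        = fun v => pvC2 (wp.count v) := by
      funext v
      exact pvFloordiv_c2 (wp.count v)
    rw [hterm]
    exact (pvGroup_c2 wp.length wp (PySem.Set.ofList wp) le_rfl
      (PySem.Set.nodup_ofList wp) (fun v => PySem.Set.mem_ofList wp v)).symm
  · rw [if_neg (by omega), if_neg (by omega)]
    simp only [hcnt]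
    rw [pvF_pos_eq_phi _ _ hs hd, pvPhi_perm d hperm]
    rw [PySem.Dict.items_counter wp, List.map_map]
    have hterm : ((fun vc : Int × Int => vc.2 * (PySem.Dict.counter wp).getD (vc.1 + d) 0)
          ∘ fun k => (k, (wp.count k : Int)))
        = fun v => (wp.count v : Int) * ((fun u => (wp.count (u + d) : Int)) v) := by
      funext v
      simp [PySem.Dict.getD_counter]
    rw [hterm]
    rw [pvGroup_mul (fun u => (wp.count (u + d) : Int)) wp.length wp (PySem.Set.ofList wp) le_rfl
      (PySem.Set.nodup_ofList wp) (fun v => PySem.Set.mem_ofList wp v)]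
    rfl
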